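-- pv_equiv track=rewrite | github.com/aqeel-12/Krey-l-Segmentation | reformat.py | segment_to_tag
-- ===== SOURCE A (Python) =====
-- def segment_to_tag(input_string):
--     #segmentation to B and I tags
--     result = []
--     separated=False
--     input_string = "-"+input_string
--     for letter in input_string:
--         if letter == "-":
--             separated=True
--             continue
--         if separated:
--             result.append("B") #B is 0
--             separated = False
--         else:
--             result.append("I") #I is 1
--     return result
-- ===== SOURCE B (Python) =====
-- def segment_to_tag(input_string):
--     # segmentation to B and I tags, per dash-separated segment
--     tags = []
--     for seg in input_string.split('-'):
--         if seg:
--             tags.append('B')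
--             tags.extend(['I'] * (len(seg) - 1))
--     return tags
-- ===== Notes on version B (the rewrite author's own statement) =====
-- stated objective: idiomatic
-- what changed: B splits on '-' and emits one 'B' plus len(seg)-1 'I's per non-empty segment, replacing A's char-by-char scan with a 'separated' flag.
import Mathlib
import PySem

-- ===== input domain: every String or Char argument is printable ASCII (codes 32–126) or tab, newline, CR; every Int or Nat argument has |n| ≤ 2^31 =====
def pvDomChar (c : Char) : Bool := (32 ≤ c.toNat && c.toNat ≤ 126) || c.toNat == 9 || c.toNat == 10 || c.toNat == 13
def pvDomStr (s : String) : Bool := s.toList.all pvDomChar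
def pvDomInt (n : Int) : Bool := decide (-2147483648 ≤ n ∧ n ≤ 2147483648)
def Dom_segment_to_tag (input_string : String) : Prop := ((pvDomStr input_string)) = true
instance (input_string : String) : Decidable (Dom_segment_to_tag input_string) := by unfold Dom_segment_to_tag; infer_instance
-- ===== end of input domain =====

-- B replaces A's char-by-char scan with a boolean flag by splitting on '-' and emitting 'B' + 'I'*(len-1) per non-empty segment (idiomatic decomposition, same cost).


-- ===== PORT A =====
-- literal port: result/separated state threaded by a fold over the characters of "-" + input_string
def segment_to_tag (input_string : String) : List String :=
  (("-" ++ input_string).toList.foldl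
    (fun (st : List String × Bool) letter =>
      if letter = '-' then (st.1, true)
      else if st.2 then (st.1 ++ ["B"], false)
      else (st.1 ++ ["I"], false))
    ([], false)).1

-- ===== PORT B =====
-- input_string.split('-') with a one-char separator = splitOnP (· == '-') on the char list
def segment_to_tag_alt (input_string : String) : List String :=
  (input_string.toList.splitOnP (· == '-')).foldl
    (fun tags seg =>
      if seg ≠ [] then (tags ++ ["B"]) ++ List.replicate (seg.length - 1) "I" else tags)
    []

-- ===== PRECONDITION & SPEC =====
def Spec_segment_to_tag (input_string : String) (out : List String) : Prop := out = segment_to_tag_alt input_string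
instance (input_string : String) (out : List String) : Decidable (Spec_segment_to_tag input_string out) := by unfold Spec_segment_to_tag; infer_instance

-- ===== CLAIM (what is proved, stated in full; the proofs are below) =====
def Claim_equal_segment_to_tag : Prop := ∀ (input_string : String), Dom_segment_to_tag input_string → Spec_segment_to_tag input_string (segment_to_tag input_string)

-- ===== LEMMAS AND PROOFS =====

-- spec form of A's loop body (after the state has been pulled out of the fold)
def tagsA : List Char → Bool → List String
  | [], _ => []
  | c :: cs, sep =>
    if c = '-' then tagsA cs true
    else (if sep then "B" else "I") :: tagsA cs false

-- spec form of B's loop (flatMap over the split segments)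
def tagsB (parts : List (List Char)) : List String :=
  parts.flatMap (fun seg => if seg ≠ [] then "B" :: List.replicate (seg.length - 1) "I" else [])

theorem foldA_eq_tagsA (cs : List Char) (acc : List String) (sep : Bool) :
    (cs.foldl
      (fun (st : List String × Bool) letter =>
        if letter = '-' then (st.1, true)
        else if st.2 then (st.1 ++ ["B"], false)
        else (st.1 ++ ["I"], false))
      (acc, sep)).1 = acc ++ tagsA cs sep := by
  induction cs generalizing acc sep with
  | nil => simp [tagsA]
  | cons c cs ih =>
    by_cases hc : c = '-'
    · simp [hc, tagsA, ih]
    · cases sep <;> simp [List.foldl_cons, hc, tagsA, ih]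

theorem foldB_eq_tagsB (parts : List (List Char)) (acc : List String) :
    (parts.foldl
      (fun tags seg =>
        if seg ≠ [] then (tags ++ ["B"]) ++ List.replicate (seg.length - 1) "I" else tags)
      acc) = acc ++ tagsB parts := by
  induction parts generalizing acc with
  | nil => simp [tagsB]
  | cons p ps ih =>
    by_cases hp : p = []
    · rw [List.foldl_cons, if_neg (by simp [hp]), ih]
      simp [tagsB, hp]
    · rw [List.foldl_cons, if_pos hp, ih]
      simp [tagsB, hp, List.flatMap_cons]

theorem tagsA_eq_tagsB (cs : List Char) :
    tagsA cs true = tagsB (cs.splitOnP (· == '-')) ∧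
    (∀ h t, cs.splitOnP (· == '-') = h :: t →
      tagsA cs false = List.replicate h.length "I" ++ tagsB t) := by
  induction cs with
  | nil =>
    refine ⟨by simp [tagsA, tagsB], ?_⟩
    intro h t hsplit
    simp [List.splitOnP_nil] at hsplit
    simp [hsplit.1, hsplit.2, tagsA, tagsB]
  | cons c cs ih =>
    obtain ⟨ih1, ih2⟩ := ih
    by_cases hc : c = '-'
    · refine ⟨?_, ?_⟩
      · simp [tagsA, hc, List.splitOnP_cons, ih1, tagsB]
      · intro h t hsplit
        rw [List.splitOnP_cons] at hsplit
        simp [hc] at hsplit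
        simp [tagsA, hc, hsplit.1.symm, ih1, hsplit.2.symm]
    · obtain ⟨h, t, hht⟩ : ∃ h t, cs.splitOnP (· == '-') = h :: t := by
        rcases e : cs.splitOnP (· == '-') with _ | ⟨h, t⟩
        · exact absurd e (List.splitOnP_ne_nil _ _)
        · exact ⟨h, t, rfl⟩
      have hcons : (c :: cs).splitOnP (· == '-') = (c :: h) :: t := by
        rw [List.splitOnP_cons]; simp [hc, hht]
      refine ⟨?_, ?_⟩
      · rw [hcons]
        simp [tagsA, hc, tagsB, List.flatMap_cons, ih2 h t hht]
      · intro h' t' hsplit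
        rw [hcons] at hsplit
        injection hsplit with e1 e2
        subst e2
        rw [← e1]
        simp [tagsA, hc, ih2 h t hht, List.replicate_succ]

-- ===== VERDICT (by name: the statement is the Claim_ definition above) =====
theorem segment_to_tag_spec : Claim_equal_segment_to_tag := by
  intro s _
  unfold Spec_segment_to_tag segment_to_tag segment_to_tag_alt
  have htl : ("-" ++ s).toList = '-' :: s.toList := by simp
  rw [htl, List.foldl_cons]
  simp only [if_pos]
  rw [foldA_eq_tagsA, foldB_eq_tagsB]
  simpa using (tagsA_eq_tagsB s.toList).1
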